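-- pv_equiv track=rewrite | github.com/mramirezcamacho/TablePerBDM | BLD_serio.py | keepImportantStuff
-- ===== SOURCE A (Python) =====
-- def keepImportantStuff(bds_data):
--     stuff = {}
--     for bd, data in bds_data.items():
--         dataRelevant2Keep = []
--         for column, miniDict in data.items():
--             if column not in ['Promotional Coverage', 'Promotion quality', 'CKAs B cancellation rate', 'CKAs imperfect orders']:
--                 for miniColumn, value in miniDict.items():
--                     if miniColumn not in dataRelevant2Keep:
--                         dataRelevant2Keep.append(miniColumn)
--         stuff[bd] = dataRelevant2Keep
--     # lets delete all miniColumns that are not in dataRelevant2Keep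
--     for bd, data in bds_data.items():
--         dataRelevant2Keep = stuff[bd]
--         for column, miniDict in data.items():
--             for miniColumn in list(miniDict.keys()):
--                 if miniColumn not in dataRelevant2Keep:
--                     del bds_data[bd][column][miniColumn]
--     for bd, data in bds_data.items():
--         for column, miniDict in data.items():
--             for importante in stuff[bd]:
--                 if importante not in miniDict:
--                     bds_data[bd][column][importante] = 0
--     return bds_data, stuff
-- ===== SOURCE B (Python) =====
-- EXCLUDED = frozenset({'Promotional Coverage', 'Promotion quality',
--                       'CKAs B cancellation rate', 'CKAs imperfect orders'})
--
--
-- def _keepOrder(data):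
--     # ordered dedup of all miniColumns of the non-excluded columns
--     return list(dict.fromkeys(
--         mc for col, md in data.items() if col not in EXCLUDED for mc in md))
--
--
-- def _rebuild(md, keep):
--     keepset = set(keep)
--     present = keepset & set(md)
--     new = {k: v for k, v in md.items() if k in keepset}
--     new.update((k, 0) for k in keep if k not in present)
--     return new
--
--
-- def keepImportantStuff(bds_data):
--     stuff = {bd: _keepOrder(data) for bd, data in bds_data.items()}
--     for bd, data in bds_data.items():
--         for col in data:
--             data[col] = _rebuild(data[col], stuff[bd])
--     return bds_data, stuff
-- ===== Notes on version B (the rewrite author's own statement) =====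
-- stated objective: simpler
-- what changed: Pass 1's nested append-if-new loops become a flatten-then-ordered-dedup (dict.fromkeys over a generator), and A's two separate mutation passes (del of non-kept miniColumns, then fill of missing ones with 0) are fused into one rebuild per miniDict: a dict comprehension keeping the surviving pairs followed by an update with (k, 0) for the keys missing from the precomputed present-set.
import Mathlib
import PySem

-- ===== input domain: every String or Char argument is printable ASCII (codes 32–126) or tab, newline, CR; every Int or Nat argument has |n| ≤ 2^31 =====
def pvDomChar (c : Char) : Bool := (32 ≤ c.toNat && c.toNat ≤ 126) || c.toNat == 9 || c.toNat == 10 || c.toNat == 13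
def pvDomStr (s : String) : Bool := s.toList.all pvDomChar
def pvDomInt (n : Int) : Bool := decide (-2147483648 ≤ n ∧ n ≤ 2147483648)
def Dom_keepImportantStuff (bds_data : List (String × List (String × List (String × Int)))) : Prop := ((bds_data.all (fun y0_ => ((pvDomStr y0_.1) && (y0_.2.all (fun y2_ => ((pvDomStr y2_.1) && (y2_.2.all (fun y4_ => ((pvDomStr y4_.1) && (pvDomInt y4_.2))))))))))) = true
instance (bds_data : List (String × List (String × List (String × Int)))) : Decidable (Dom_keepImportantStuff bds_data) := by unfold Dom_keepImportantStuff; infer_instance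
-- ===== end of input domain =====

-- B replaces A's three nested-loop passes by (1) flatten-then-ordered-dedup (dict.fromkeys over a
-- generator) for the kept miniColumns and (2) one rebuild per miniDict (dict comprehension of the
-- survivors, then update with (k, 0) for the keys missing from 'present'); objective: simpler.
-- Both Pythons mutate bds_data in place and return it; the equivalence is about the returned value.

-- ===== PORT A =====
def pvExcluded : List String :=
  ["Promotional Coverage", "Promotion quality", "CKAs B cancellation rate", "CKAs imperfect orders"]

-- pass 1 of A: deduped ordered miniColumns of the non-excluded columns
def pvRelevantA (data : List (String × List (String × Int))) : List String :=
  data.foldl (fun acc cm =>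
    if cm.1 ∈ pvExcluded then acc
    else cm.2.foldl (fun acc2 mv => if mv.1 ∈ acc2 then acc2 else acc2 ++ [mv.1]) acc) []

def pvStuffA (bds_data : List (String × List (String × List (String × Int)))) :
    PySem.Dict String (List String) :=
  bds_data.foldl (fun d bd => d.insert bd.1 (pvRelevantA bd.2)) PySem.Dict.empty

-- del miniDict[k]: remove the entry with key k (keys of a Python dict are unique)
def pvDelKey (l : List (String × Int)) (k : String) : List (String × Int) :=
  match l with
  | [] => []
  | p :: t => if p.1 = k then t else p :: pvDelKey t k

-- pass 2 of A: for miniColumn in list(miniDict.keys()): if not kept, del it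
def pvPruneA (md : List (String × Int)) (keep : List String) : List (String × Int) :=
  (md.map Prod.fst).foldl (fun d k => if k ∈ keep then d else pvDelKey d k) md

-- pass 3 of A: for importante in keep: if not a key yet, append it with 0
def pvFillA (md : List (String × Int)) (keep : List String) : List (String × Int) :=
  keep.foldl (fun d k => if (d.map Prod.fst).contains k then d else d ++ [(k, (0 : Int))]) md

def keepImportantStuff (bds_data : List (String × List (String × List (String × Int)))) : (List (String × List (String × List (String × Int)))) × (List (String × List String)) :=
  let stuff := pvStuffA bds_data
  -- stuff[bd] never raises: pass 1 inserted every bd; getD's default is never used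
  let bds2 := bds_data.map (fun bd => (bd.1, bd.2.map (fun cm => (cm.1, pvPruneA cm.2 (stuff.getD bd.1 [])))))
  let bds3 := bds2.map (fun bd => (bd.1, bd.2.map (fun cm => (cm.1, pvFillA cm.2 (stuff.getD bd.1 [])))))
  (bds3, stuff.items)

-- ===== PORT B =====
def pvExcludedSet : PySem.Set String :=
  PySem.Set.ofList
    ["Promotional Coverage", "Promotion quality", "CKAs B cancellation rate", "CKAs imperfect orders"]

-- _keepOrder: ordered dedup (dict.fromkeys) of the flattened miniColumns of the kept columns
def pvKeepOrder (data : List (String × List (String × Int))) : List String :=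
  PySem.List.dedup (data.flatMap (fun cm =>
    if PySem.Set.contains pvExcludedSet cm.1 then [] else cm.2.map Prod.fst))

-- _rebuild: comprehension of the surviving pairs, then update with (k, 0) for the missing keys
def pvRebuildB (md : List (String × Int)) (keep : List String) : List (String × Int) :=
  let keepset := PySem.Set.ofList keep
  let present := PySem.Set.inter keepset (PySem.Set.ofList (md.map Prod.fst))
  let base := md.foldl (fun (d : PySem.Dict String Int) p =>
    if PySem.Set.contains keepset p.1 then d.insert p.1 p.2 else d) PySem.Dict.empty
  ((keep.filter (fun k => !(PySem.Set.contains present k))).foldl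
    (fun d k => d.insert k (0 : Int)) base).items

def keepImportantStuff_alt (bds_data : List (String × List (String × List (String × Int)))) : (List (String × List (String × List (String × Int)))) × (List (String × List String)) :=
  let stuff := bds_data.foldl (fun (d : PySem.Dict String (List String)) bd =>
    d.insert bd.1 (pvKeepOrder bd.2)) PySem.Dict.empty
  (bds_data.map (fun bd => (bd.1, bd.2.map (fun cm => (cm.1, pvRebuildB cm.2 (stuff.getD bd.1 []))))),
   stuff.items)

-- ===== PRECONDITION & SPEC =====
-- Pre_ excludes only association lists in which some miniDict repeats a key: a Python dict cannot
-- repeat a key, so every input the Python function can receive satisfies Pre_ (it is the dict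
-- representation invariant, not a narrowing of A's domain).
def Pre_keepImportantStuff (bds_data : List (String × List (String × List (String × Int)))) : Prop :=
  ∀ bd ∈ bds_data, ∀ cm ∈ bd.2, (cm.2.map Prod.fst).Nodup
instance (bds_data : List (String × List (String × List (String × Int)))) : Decidable (Pre_keepImportantStuff bds_data) := by unfold Pre_keepImportantStuff; infer_instance

def pvWitness_keepImportantStuff : (List (String × List (String × List (String × Int)))) :=
  [("bd1", [("col", [("a", 1), ("b", 2)]), ("Promotion quality", [("c", 3)])])]

def Spec_keepImportantStuff (bds_data : List (String × List (String × List (String × Int)))) (out : (List (String × List (String × List (String × Int)))) × (List (String × List String))) : Prop := out = keepImportantStuff_alt bds_data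
instance (bds_data : List (String × List (String × List (String × Int)))) (out : (List (String × List (String × List (String × Int)))) × (List (String × List String))) : Decidable (Spec_keepImportantStuff bds_data out) := by
  unfold Spec_keepImportantStuff
  haveI : DecidableEq (String × List (String × Int)) := by infer_instance
  haveI : DecidableEq (String × List (String × List (String × Int))) := by infer_instance
  infer_instance

-- ===== CLAIM (what is proved, stated in full; the proofs are below) =====
def Claim_equal_keepImportantStuff : Prop := ∀ (bds_data : List (String × List (String × List (String × Int)))), Dom_keepImportantStuff bds_data → Pre_keepImportantStuff bds_data → Spec_keepImportantStuff bds_data (keepImportantStuff bds_data)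

-- ===== LEMMAS AND PROOFS =====

-- B's flatten-then-dedup IS A's nested append-if-new accumulation
theorem pvKeepOrder_eq (data : List (String × List (String × Int))) :
    pvKeepOrder data = pvRelevantA data := by
  unfold pvKeepOrder pvRelevantA
  rw [PySem.List.dedup_eq_ofList, PySem.Set.ofList_eq_foldl, List.foldl_flatMap]
  congr 1
  funext acc cm
  have hm : cm.1 ∈ pvExcludedSet ↔ cm.1 ∈ pvExcluded := by
    unfold pvExcludedSet pvExcluded
    exact PySem.Set.mem_ofList _ _
  by_cases h : cm.1 ∈ pvExcluded
  · simp [hm.mpr h, h]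
  · rw [if_neg h, if_neg (fun hx => h (hm.mp ((PySem.Set.contains_iff _ _).mp hx))), List.foldl_map]
    congr 1
    funext acc2 mv
    rw [PySem.Set.add_eq_ite]

-- erasing a key k' ∉ keep from a dict whose head key is in keep keeps the head
theorem pvPrune_cons_of_mem (keep : List String) (k : String) (v : Int) (hk : k ∈ keep) :
    ∀ (ks : List String) (d : List (String × Int)),
    ks.foldl (fun d k' => if k' ∈ keep then d else pvDelKey d k') ((k, v) :: d)
      = (k, v) :: ks.foldl (fun d k' => if k' ∈ keep then d else pvDelKey d k') d := by
  intro ks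
  induction ks with
  | nil => intro d; rfl
  | cons k' t ih =>
    intro d
    simp only [List.foldl_cons]
    by_cases hk' : k' ∈ keep
    · simp [hk', ih]
    · have hne : k ≠ k' := fun he => hk' (he ▸ hk)
      simp [hk', pvDelKey, hne, ih]

-- A's delete-pass over the dict's own key list is a filter
theorem pvPruneA_eq_filter (md : List (String × Int)) (keep : List String) :
    pvPruneA md keep = md.filter (fun p => decide (p.1 ∈ keep)) := by
  unfold pvPruneA
  induction md with
  | nil => rfl
  | cons p t ih =>
    simp only [List.map_cons, List.foldl_cons]
    by_cases hk : p.1 ∈ keep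
    · rw [if_pos hk, pvPrune_cons_of_mem keep p.1 p.2 hk, ih]
      simp [hk]
    · rw [if_neg hk]
      have : pvDelKey ((p.1, p.2) :: t) p.1 = t := by simp [pvDelKey]
      simp only [this]
      rw [ih]
      simp [hk]

-- B's dict comprehension over distinct fresh keys collects exactly the filtered pairs
theorem pvBaseItems (keepset : PySem.Set String) :
    ∀ (md : List (String × Int)) (d : PySem.Dict String Int),
    (md.map Prod.fst).Nodup → (∀ p ∈ md, d.contains p.1 = false) →
    (md.foldl (fun d p => if PySem.Set.contains keepset p.1 then d.insert p.1 p.2 else d) d).items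
      = d.items ++ md.filter (fun p => PySem.Set.contains keepset p.1) := by
  intro md
  induction md with
  | nil => intro d _ _; simp
  | cons p t ih =>
    intro d hnd hfresh
    have hp : p.1 ∉ t.map Prod.fst := by
      simp only [List.map_cons, List.nodup_cons] at hnd
      exact hnd.1
    have hnd' : (t.map Prod.fst).Nodup := by
      simp only [List.map_cons, List.nodup_cons] at hnd
      exact hnd.2
    simp only [List.foldl_cons]
    by_cases hc : PySem.Set.contains keepset p.1 = true
    · have hins : (d.insert p.1 p.2).items = d.items ++ [(p.1, p.2)] :=
        PySem.Dict.items_insert_of_not_contains d p.2 (hfresh p (by simp))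
      have hfresh' : ∀ q ∈ t, (d.insert p.1 p.2).contains q.1 = false := by
        intro q hq
        rw [PySem.Dict.contains_insert]
        have hne : q.1 ≠ p.1 := by
          intro he
          exact hp (he ▸ (List.mem_map.mpr ⟨q, hq, rfl⟩))
        simp [hne, hfresh q (by simp [hq])]
      have hfp : List.filter (fun q => PySem.Set.contains keepset q.1) (p :: t)
          = p :: List.filter (fun q => PySem.Set.contains keepset q.1) t := by
        simp [List.filter_cons, (PySem.Set.contains_iff _ _).mp hc]
      rw [if_pos hc, ih (d.insert p.1 p.2) hnd' hfresh', hins, hfp, List.append_assoc]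
      rfl
    · have hfp : List.filter (fun q => PySem.Set.contains keepset q.1) (p :: t)
          = List.filter (fun q => PySem.Set.contains keepset q.1) t := by
        have hnm : p.1 ∉ keepset := fun hm => hc ((PySem.Set.contains_iff _ _).mpr hm)
        simp [List.filter_cons, hnm]
      rw [if_neg hc, ih d hnd' (fun q hq => hfresh q (by simp [hq])), hfp]

-- overwriting a present key with the value it already has is a no-op
theorem pvInsertNoop (d : PySem.Dict String Int) (k : String)
    (hv : ∀ p ∈ d.items, p.1 = k → p.2 = (0 : Int))
    (hc : d.contains k = true) : d.insert k (0 : Int) = d := by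
  apply PySem.Dict.ext
  rw [PySem.Dict.items_insert_of_contains d (0 : Int) hc]
  conv_rhs => rw [← List.map_id d.items]
  apply List.map_congr_left
  intro p hp
  by_cases he : p.1 = k
  · have := hv p hp he
    simp only [he, beq_self_eq_true, if_true, id]
    cases p
    simp_all
  · simp [he, id]

-- the filtered-update fold of B equals A's append-if-missing fold, over the filtered dict F
-- extended by any disjoint zero-valued tail E
theorem pvFillLoop (present : PySem.Set String) (F : List (String × Int)) :
    ∀ (ks : List String) (E : List String), E.Nodup →
    (∀ e ∈ E, e ∉ F.map Prod.fst) →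
    (∀ k ∈ ks, PySem.Set.contains present k = true ↔ k ∈ F.map Prod.fst) →
    ((ks.filter (fun k => !(PySem.Set.contains present k))).foldl
        (fun d k => d.insert k (0 : Int))
        (PySem.Dict.mk (F ++ E.map (fun e => (e, (0 : Int)))))).items
      = ks.foldl (fun d k => if (d.map Prod.fst).contains k then d else d ++ [(k, (0 : Int))])
          (F ++ E.map (fun e => (e, (0 : Int)))) := by
  intro ks
  induction ks with
  | nil => intro E _ _ _; rfl
  | cons k0 t ih =>
    intro E hEnd hEdisj hpres
    have hpres0 := hpres k0 (by simp)
    have hprest : ∀ k ∈ t, PySem.Set.contains present k = true ↔ k ∈ F.map Prod.fst :=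
      fun k hk => hpres k (by simp [hk])
    have hmemA : ∀ k : String, k ∈ (F ++ E.map (fun e => (e, (0 : Int)))).map Prod.fst
        ↔ k ∈ F.map Prod.fst ∨ k ∈ E := by
      intro k
      rw [List.map_append, List.mem_append, List.map_map]
      constructor
      · rintro (h | h)
        · exact Or.inl h
        · rcases List.mem_map.mp h with ⟨e, he, hee⟩
          exact Or.inr (by simpa using hee ▸ he)
      · rintro (h | h)
        · exact Or.inl h
        · exact Or.inr (List.mem_map.mpr ⟨k, h, rfl⟩)
    by_cases hp : PySem.Set.contains present k0 = true
    · -- k0 survives in F: B's filter drops it, A's contains-check skips it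
      have hF : k0 ∈ F.map Prod.fst := hpres0.mp hp
      have hA : ((F ++ E.map (fun e => (e, (0 : Int)))).map Prod.fst).contains k0 = true :=
        List.contains_iff_mem.mpr ((hmemA k0).mpr (Or.inl hF))
      have hfp : List.filter (fun k => !(PySem.Set.contains present k)) (k0 :: t)
          = List.filter (fun k => !(PySem.Set.contains present k)) t := by
        simp [List.filter_cons, (PySem.Set.contains_iff _ _).mp hp]
      rw [hfp, List.foldl_cons, if_pos hA]
      exact ih E hEnd hEdisj hprest
    · have hF : k0 ∉ F.map Prod.fst := fun h => hp (hpres0.mpr h)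
      have hfp : List.filter (fun k => !(PySem.Set.contains present k)) (k0 :: t)
          = k0 :: List.filter (fun k => !(PySem.Set.contains present k)) t := by
        have hnm : k0 ∉ present := fun hm => hp ((PySem.Set.contains_iff _ _).mpr hm)
        simp [List.filter_cons, hnm]
      rw [hfp, List.foldl_cons, List.foldl_cons]
      by_cases hE : k0 ∈ E
      · -- already appended with value 0: B's insert overwrites (k0,0) with (k0,0); A skips
        have hc : (PySem.Dict.mk (F ++ E.map (fun e => (e, (0 : Int))))).contains k0 = true := by
          simp only [PySem.Dict.contains, PySem.Dict.items, List.any_eq_true]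
          exact ⟨(k0, 0), List.mem_append.mpr (Or.inr (List.mem_map.mpr ⟨k0, hE, rfl⟩)),
            beq_self_eq_true k0⟩
        have hnoop : (PySem.Dict.mk (F ++ E.map (fun e => (e, (0 : Int))))).insert k0 (0 : Int)
            = PySem.Dict.mk (F ++ E.map (fun e => (e, (0 : Int)))) := by
          apply pvInsertNoop
          · intro p hp1 hp2
            simp only [PySem.Dict.items] at hp1
            rcases List.mem_append.mp hp1 with h1 | h1
            · exact absurd (hp2 ▸ List.mem_map.mpr ⟨p, h1, rfl⟩) hF
            · rcases List.mem_map.mp h1 with ⟨e, _, he⟩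
              rw [← he]
          · exact hc
        have hA : ((F ++ E.map (fun e => (e, (0 : Int)))).map Prod.fst).contains k0 = true :=
          List.contains_iff_mem.mpr ((hmemA k0).mpr (Or.inr hE))
        rw [hnoop, if_pos hA]
        exact ih E hEnd hEdisj hprest
      · -- genuinely missing: both sides append (k0, 0)
        have hnotmem : k0 ∉ (F ++ E.map (fun e => (e, (0 : Int)))).map Prod.fst := by
          rw [hmemA k0]
          rintro (h | h)
          · exact hF h
          · exact hE h
        have hc : (PySem.Dict.mk (F ++ E.map (fun e => (e, (0 : Int))))).contains k0 = false := by
          rw [Bool.eq_false_iff]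
          intro hcc
          simp only [PySem.Dict.contains, PySem.Dict.items, List.any_eq_true] at hcc
          rcases hcc with ⟨p, hp1, hp2⟩
          exact hnotmem (List.mem_map.mpr ⟨p, hp1, by simpa using hp2⟩)
        have hins : (PySem.Dict.mk (F ++ E.map (fun e => (e, (0 : Int))))).insert k0 (0 : Int)
            = PySem.Dict.mk (F ++ (E ++ [k0]).map (fun e => (e, (0 : Int)))) := by
          apply PySem.Dict.ext
          rw [PySem.Dict.items_insert_of_not_contains _ _ hc]
          simp [PySem.Dict.items]
        have hA : ((F ++ E.map (fun e => (e, (0 : Int)))).map Prod.fst).contains k0 = false := by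
          rw [Bool.eq_false_iff]
          intro hcc
          exact hnotmem (List.contains_iff_mem.mp hcc)
        have happ : F ++ E.map (fun e => (e, (0 : Int))) ++ [(k0, (0 : Int))]
            = F ++ (E ++ [k0]).map (fun e => (e, (0 : Int))) := by
          simp
        rw [hins, hA]
        simp only [Bool.false_eq_true, if_false]
        rw [happ]
        exact ih (E ++ [k0])
          (List.Nodup.append hEnd (List.nodup_singleton k0) (by simpa using hE))
          (by intro e he
              rcases List.mem_append.mp he with h1 | h1
              · exact hEdisj e h1
              · rw [List.mem_singleton.mp h1]; exact hF)
          hprest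

-- B's single rebuild = A's prune followed by A's fill (miniDict keys distinct)
theorem pvRebuild_eq (md : List (String × Int)) (keep : List String)
    (hnd : (md.map Prod.fst).Nodup) :
    pvRebuildB md keep = pvFillA (pvPruneA md keep) keep := by
  unfold pvRebuildB pvFillA
  dsimp only
  rw [pvPruneA_eq_filter]
  have hcond : ∀ p : String × Int,
      PySem.Set.contains (PySem.Set.ofList keep) p.1 = decide (p.1 ∈ keep) := by
    intro p
    by_cases h : p.1 ∈ keep
    · simp [h, PySem.Set.contains_iff, PySem.Set.mem_ofList]
    · simp only [h, decide_false]
      rw [Bool.eq_false_iff]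
      intro hc
      exact h ((PySem.Set.mem_ofList _ _).mp ((PySem.Set.contains_iff _ _).mp hc))
  have hF : md.filter (fun p => PySem.Set.contains (PySem.Set.ofList keep) p.1)
      = md.filter (fun p => decide (p.1 ∈ keep)) := by
    apply List.filter_congr
    intro p _
    exact hcond p
  have hbase : (md.foldl (fun (d : PySem.Dict String Int) p =>
      if PySem.Set.contains (PySem.Set.ofList keep) p.1 then d.insert p.1 p.2 else d)
      PySem.Dict.empty)
      = PySem.Dict.mk (md.filter (fun p => decide (p.1 ∈ keep))) := by
    apply PySem.Dict.ext
    rw [pvBaseItems (PySem.Set.ofList keep) md PySem.Dict.empty hnd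
      (fun p _ => by simp [PySem.Dict.contains, PySem.Dict.empty])]
    rw [hF]
    simp [PySem.Dict.empty, PySem.Dict.items]
  rw [hbase]
  have := pvFillLoop
    (PySem.Set.inter (PySem.Set.ofList keep) (PySem.Set.ofList (md.map Prod.fst)))
    (md.filter (fun p => decide (p.1 ∈ keep))) keep [] (List.nodup_nil) (by simp)
    (by
      intro k hk
      rw [PySem.Set.contains_iff, PySem.Set.mem_inter]
      simp only [PySem.Set.mem_ofList]
      constructor
      · rintro ⟨-, hmd⟩
        rcases List.mem_map.mp hmd with ⟨p, hp, he⟩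
        exact List.mem_map.mpr ⟨p, List.mem_filter.mpr ⟨hp, by simp [he, hk]⟩, he⟩
      · intro h
        rcases List.mem_map.mp h with ⟨p, hp, he⟩
        exact ⟨hk, List.mem_map.mpr ⟨p, (List.mem_filter.mp hp).1, he⟩⟩)
  simpa using this

-- the two pass-1 dicts coincide
theorem pvStuff_eq (bds_data : List (String × List (String × List (String × Int)))) :
    bds_data.foldl (fun (d : PySem.Dict String (List String)) bd =>
      d.insert bd.1 (pvKeepOrder bd.2)) PySem.Dict.empty = pvStuffA bds_data := by
  unfold pvStuffA
  congr 1
  funext d bd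
  rw [pvKeepOrder_eq]

-- ===== VERDICT (by name: the statement is the Claim_ definition above) =====
theorem keepImportantStuff_spec : Claim_equal_keepImportantStuff := by
  intro bds_data _ hpre
  unfold Spec_keepImportantStuff keepImportantStuff keepImportantStuff_alt
  rw [pvStuff_eq]
  simp only [List.map_map]
  congr 1
  apply List.map_congr_left
  intro bd hbd
  simp only [Function.comp]
  congr 1
  rw [List.map_map]
  apply List.map_congr_left
  intro cm hcm
  simp only [Function.comp]
  congr 1
  exact (pvRebuild_eq cm.2 _ (hpre bd hbd cm hcm)).symm
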